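-- pv_equiv track=rewrite | github.com/SheepyLord/Gmod-Simple-Static-Model-Importer | importer_tool/importer_core.py | maybe_flip_triangle_winding
-- ===== SOURCE A (Python) =====
-- def maybe_flip_triangle_winding(indices: list[int], should_flip: bool) -> list[int]:
--     if not should_flip or len(indices) < 3:
--         return list(indices)
--
--     flipped: list[int] = []
--     whole_triangle_count = len(indices) // 3
--     for triangle_index in range(whole_triangle_count):
--         base = triangle_index * 3
--         flipped.extend((indices[base], indices[base + 2], indices[base + 1]))
--
--     leftover = len(indices) % 3
--     if leftover:
--         flipped.extend(indices[-leftover:])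
--
--     return flipped
-- ===== SOURCE B (Python) =====
-- def maybe_flip_triangle_winding(indices: list[int], should_flip: bool) -> list[int]:
--     if not should_flip:
--         return list(indices)
--     return _flip(indices)
--
--
-- def _flip(xs: list[int]) -> list[int]:
--     # recursion on the structure: swap 2nd/3rd of the leading triangle, recurse on the rest;
--     # a tail shorter than a triangle is returned unchanged
--     if len(xs) < 3:
--         return list(xs)
--     return [xs[0], xs[2], xs[1]] + _flip(xs[3:])
-- ===== Notes on version B (the rewrite author's own statement) =====
-- stated objective: simpler
-- what changed: Replaced the index-arithmetic loop over range(len//3) plus an explicit modulo-leftover append with direct structural recursion that peels three vertices at a time and leaves a short tail unchanged.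
import Mathlib
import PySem

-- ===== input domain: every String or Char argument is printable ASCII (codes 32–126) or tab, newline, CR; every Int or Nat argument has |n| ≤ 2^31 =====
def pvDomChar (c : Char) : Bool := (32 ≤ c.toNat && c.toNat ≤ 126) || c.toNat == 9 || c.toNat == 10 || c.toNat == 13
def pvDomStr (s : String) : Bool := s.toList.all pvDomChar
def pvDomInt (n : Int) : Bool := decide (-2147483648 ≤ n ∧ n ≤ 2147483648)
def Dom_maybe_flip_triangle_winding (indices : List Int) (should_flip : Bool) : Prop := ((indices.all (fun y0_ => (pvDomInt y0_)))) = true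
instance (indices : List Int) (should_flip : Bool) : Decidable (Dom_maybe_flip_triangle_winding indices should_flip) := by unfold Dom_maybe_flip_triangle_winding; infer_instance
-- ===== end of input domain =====

-- B replaces A's index-arithmetic range loop + modulo-leftover append with a structural
-- recursion that peels one triangle at a time; same result, objective: simpler.

-- ===== PORT A =====
-- literal port of A: range loop over whole triangles with index arithmetic, then the
-- modulo leftover appended via a negative-start slice. Every index the loop reads is in
-- range (base+2 < 3*(len//3) ≤ len), so pyGetD with default 0 is exact here.
def maybe_flip_triangle_winding (indices : List Int) (should_flip : Bool) : List Int :=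
  if !should_flip || indices.length < 3 then indices
  else
    let whole_triangle_count : Int := PySem.Int.floordiv (indices.length : Int) 3
    let flipped :=
      (PySem.List.pyRange 0 whole_triangle_count 1).foldl
        (fun acc ti =>
          let base := ti * 3
          acc ++ [PySem.List.pyGetD indices base 0,
                  PySem.List.pyGetD indices (base + 2) 0,
                  PySem.List.pyGetD indices (base + 1) 0]) []
    let leftover : Int := PySem.Int.mod (indices.length : Int) 3
    if leftover ≠ 0 then flipped ++ PySem.List.slice indices (some (-leftover)) none
    else flipped

-- ===== PORT B =====
-- helper `_flip` of Source B: peel one triangle, swap its 2nd and 3rd vertex, recurse;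
-- a tail shorter than a triangle is returned unchanged
def flipRec : List Int → List Int
  | a :: b :: c :: rest => a :: c :: b :: flipRec rest
  | xs => xs

def maybe_flip_triangle_winding_alt (indices : List Int) (should_flip : Bool) : List Int :=
  if !should_flip then indices else flipRec indices

-- ===== PRECONDITION & SPEC =====
def Spec_maybe_flip_triangle_winding (indices : List Int) (should_flip : Bool) (out : List Int) : Prop := out = maybe_flip_triangle_winding_alt indices should_flip
instance (indices : List Int) (should_flip : Bool) (out : List Int) : Decidable (Spec_maybe_flip_triangle_winding indices should_flip out) := by unfold Spec_maybe_flip_triangle_winding; infer_instance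

-- ===== CLAIM (what is proved, stated in full; the proofs are below) =====
def Claim_equal_maybe_flip_triangle_winding : Prop := ∀ (indices : List Int) (should_flip : Bool), Dom_maybe_flip_triangle_winding indices should_flip → Spec_maybe_flip_triangle_winding indices should_flip (maybe_flip_triangle_winding indices should_flip)

-- ===== LEMMAS AND PROOFS =====

-- flipRec leaves a list shorter than a triangle unchanged
lemma flipRec_short (xs : List Int) (h : xs.length < 3) : flipRec xs = xs := by
  match xs with
  | [] => rfl
  | [a] => rfl
  | [a, b] => rfl
  | a :: b :: c :: rest => simp at h; omega

-- A's loop body, written as a flatMap over Nat triangle indices, plus the leftover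
-- tail, equals B's recursion
lemma flip_core (xs : List Int) :
    (List.range (xs.length / 3)).flatMap
        (fun t => [xs.getD (t*3) 0, xs.getD (t*3+2) 0, xs.getD (t*3+1) 0])
      ++ xs.drop (xs.length - xs.length % 3)
    = flipRec xs := by
  match xs with
  | [] => simp [flipRec]
  | [a] => simp [flipRec]
  | [a, b] => simp [flipRec]
  | a :: b :: c :: rest =>
    have h : (a :: b :: c :: rest).length / 3 = rest.length / 3 + 1 := by
      simp; omega
    have h2 : (a :: b :: c :: rest).length - (a :: b :: c :: rest).length % 3
        = (rest.length - rest.length % 3) + 3 := by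
      simp; omega
    rw [h, h2, List.range_succ_eq_map]
    simp only [List.flatMap_cons, List.flatMap_map]
    have hb : List.flatMap (fun t => [(a :: b :: c :: rest).getD (t.succ*3) 0,
                    (a :: b :: c :: rest).getD (t.succ*3+2) 0,
                    (a :: b :: c :: rest).getD (t.succ*3+1) 0]) (List.range (rest.length / 3))
        = List.flatMap (fun t => [rest.getD (t*3) 0, rest.getD (t*3+2) 0,
                    rest.getD (t*3+1) 0]) (List.range (rest.length / 3)) := by
      rw [List.flatMap_def, List.flatMap_def]
      congr 1
      apply List.map_congr_left
      intro t _
      have e2 : t.succ*3+2 = t*3+2+1+1+1 := by omega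
      have e1 : t.succ*3+1 = t*3+1+1+1+1 := by omega
      have e0 : t.succ*3 = t*3+1+1+1 := by omega
      rw [e2, e1, e0]
      simp
    rw [hb]
    have hd : List.drop ((rest.length - rest.length % 3) + 3) (a :: b :: c :: rest)
        = List.drop (rest.length - rest.length % 3) rest := by
      rfl
    rw [hd]
    have ih := flip_core rest
    simp only [flipRec]
    simp [List.getD]
    simpa [List.getD] using ih

-- A's pyRange/pyGetD loop equals the Nat flatMap used in flip_core
lemma loop_eq_flatMap (xs : List Int) :
    (PySem.List.pyRange 0 (PySem.Int.floordiv (xs.length : Int) 3) 1).foldl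
      (fun acc ti =>
        acc ++ [PySem.List.pyGetD xs (ti*3) 0,
                PySem.List.pyGetD xs (ti*3 + 2) 0,
                PySem.List.pyGetD xs (ti*3 + 1) 0]) []
    = (List.range (xs.length / 3)).flatMap
        (fun t => [xs.getD (t*3) 0, xs.getD (t*3+2) 0, xs.getD (t*3+1) 0]) := by
  have hfd : PySem.Int.floordiv (xs.length : Int) 3 = ((xs.length / 3 : Nat) : Int) := by
    exact_mod_cast PySem.Int.floordiv_natCast xs.length 3
  rw [hfd, PySem.List.foldl_append_eq_flatMap, PySem.List.pyRange_zero_natCast]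
  rw [List.flatMap_map, List.nil_append]
  rw [List.flatMap_def, List.flatMap_def]
  congr 1
  apply List.map_congr_left
  intro t _
  have c0 : ((t : Int) * 3) = ((t * 3 : Nat) : Int) := by push_cast; ring
  have c2 : (((t * 3 : Nat) : Int) + 2) = ((t * 3 + 2 : Nat) : Int) := by push_cast; ring
  have c1 : (((t * 3 : Nat) : Int) + 1) = ((t * 3 + 1 : Nat) : Int) := by push_cast; ring
  simp only [c0, c2, c1, PySem.List.pyGetD_natCast]

-- ===== VERDICT (by name: the statement is the Claim_ definition above) =====
theorem maybe_flip_triangle_winding_spec : Claim_equal_maybe_flip_triangle_winding := by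
  intro indices should_flip _
  unfold Spec_maybe_flip_triangle_winding
  cases should_flip with
  | false => simp [maybe_flip_triangle_winding, maybe_flip_triangle_winding_alt]
  | true =>
    have halt : maybe_flip_triangle_winding_alt indices true = flipRec indices := by
      simp [maybe_flip_triangle_winding_alt]
    rw [halt]
    by_cases hlen : indices.length < 3
    · simp [maybe_flip_triangle_winding, hlen, flipRec_short indices hlen]
    · have hmod : PySem.Int.mod (indices.length : Int) 3 = ((indices.length % 3 : Nat) : Int) := by
        exact_mod_cast PySem.Int.mod_natCast indices.length 3
      have hcore := flip_core indices
      simp only [maybe_flip_triangle_winding, Bool.not_true, Bool.false_or]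
      rw [if_neg (by simpa using hlen)]
      rw [loop_eq_flatMap, hmod]
      by_cases hz : indices.length % 3 = 0
      · rw [if_neg (by simp [hz])]
        rw [hz, Nat.sub_zero, List.drop_length, List.append_nil] at hcore
        exact hcore
      · rw [if_pos (by exact_mod_cast hz)]
        rw [PySem.List.slice_from_neg_natCast (xs := indices) (k := indices.length % 3) (by omega)]
        exact hcore
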